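-- pv_equiv track=rewrite | github.com/wunianjian/SRL-DynamicQA | ArgumentLabelingDQA/dataloader.py | batch_by_tokens
-- ===== SOURCE A (Python) =====
-- def batch_by_tokens(length, max_tokens):
--     indexes = []
--     i = 0
--     while i < len(length):
--         for j in range(i, len(length)):
--             maxc = max(length[i:j + 1])
--             maxn = max(maxc, length[min(j + 1, len(length) - 1)])
--             current_batch_tokens = maxc * (j + 1 - i)
--             next_batch_tokens = maxn * (j + 2 - i)
--             if (current_batch_tokens <= max_tokens < next_batch_tokens) or j == len(length) - 1:
--                 indexes.append((i, j))
--                 i = j + 1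
--                 break
--     return indexes
-- ===== SOURCE B (Python) =====
-- def batch_by_tokens(length, max_tokens):
--     n = len(length)
--     indexes = []
--     i = 0
--     m = None  # running max of length[i:j+1], None at a fresh segment start
--     for j in range(n):
--         v = length[j]
--         m = v if m is None else max(m, v)
--         nxt = max(m, length[min(j + 1, n - 1)])
--         if (m * (j + 1 - i) <= max_tokens < nxt * (j + 2 - i)) or j == n - 1:
--             indexes.append((i, j))
--             i = j + 1
--             m = None
--     return indexes
-- ===== Notes on version B (the rewrite author's own statement) =====
-- stated objective: faster
-- what changed: Single pass that maintains the current segment's running max incrementally instead of recomputing max(length[i:j+1]) by a fresh slice scan at every step.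
import Mathlib
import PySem

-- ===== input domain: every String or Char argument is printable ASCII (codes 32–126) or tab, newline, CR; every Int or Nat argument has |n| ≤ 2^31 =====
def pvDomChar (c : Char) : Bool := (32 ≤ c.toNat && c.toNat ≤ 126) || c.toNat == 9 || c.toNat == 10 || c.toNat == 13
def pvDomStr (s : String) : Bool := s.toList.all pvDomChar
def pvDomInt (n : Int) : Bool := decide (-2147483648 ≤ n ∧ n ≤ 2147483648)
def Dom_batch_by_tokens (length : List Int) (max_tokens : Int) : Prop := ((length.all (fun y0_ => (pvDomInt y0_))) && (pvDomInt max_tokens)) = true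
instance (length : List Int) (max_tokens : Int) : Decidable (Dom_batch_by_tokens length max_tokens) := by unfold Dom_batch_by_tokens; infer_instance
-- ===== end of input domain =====

-- B replaces A's per-step slice-max recomputation by a single pass with an incrementally
-- maintained running max of the current segment (asymptotically faster; proved equal everywhere).


-- ===== PORT A =====
-- A's inner `for j in range(i, len(length))` up to the `break`; returns the j at which it breaks
-- (none only if the loop would run off the end, which never happens since j = len-1 always breaks).
def pvAInner (length : List Int) (max_tokens : Int) (i j : Nat) : Option Nat :=
  if h : j < length.length then
    -- maxc = max(length[i:j+1])  (slice nonempty for i ≤ j < len, so the .getD 0 default is dead code)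
    let maxc := (PySem.List.max? (PySem.List.slice length (some (i : Int)) (some ((j : Int) + 1))) (fun y => y)).getD 0
    -- maxn = max(maxc, length[min(j+1, len-1)])  (index always in range here; default dead code)
    let maxn := max maxc (PySem.List.pyGetD length (min ((j : Int) + 1) ((length.length : Int) - 1)) 0)
    if (maxc * ((j : Int) + 1 - (i : Int)) ≤ max_tokens ∧ max_tokens < maxn * ((j : Int) + 2 - (i : Int))) ∨ j = length.length - 1
    then some j
    else pvAInner length max_tokens i (j + 1)
  else none
termination_by length.length - j

-- needed only for the termination of pvAOuter below (the port cites it in decreasing_by)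
theorem pvAInner_bound (length : List Int) (max_tokens : Int) (i j j' : Nat)
    (h : pvAInner length max_tokens i j = some j') : j ≤ j' ∧ j' < length.length := by
  have H : ∀ (k jj : Nat), length.length - jj ≤ k →
      pvAInner length max_tokens i jj = some j' → jj ≤ j' ∧ j' < length.length := by
    intro k
    induction k with
    | zero =>
      intro jj hk hh
      rw [pvAInner, dif_neg (by omega)] at hh
      cases hh
    | succ k ih =>
      intro jj hk hh
      rw [pvAInner] at hh
      split at hh
      · rename_i hjl
        simp only [] at hh
        split at hh
        · obtain rfl := Option.some.inj hh
          exact ⟨Nat.le.refl, hjl⟩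
        · have := ih (jj + 1) (by omega) hh
          omega
      · cases hh
  exact H (length.length - j) j (by omega) h

-- A's outer `while i < len(length)` loop
def pvAOuter (length : List Int) (max_tokens : Int) (i : Nat) : List (Int × Int) :=
  if h : i < length.length then
    match hm : pvAInner length max_tokens i i with
    | some j => ((i : Int), (j : Int)) :: pvAOuter length max_tokens (j + 1)
    | none => []
  else []
termination_by length.length - i
decreasing_by have := pvAInner_bound length max_tokens i i _ hm; omega

def batch_by_tokens (length : List Int) (max_tokens : Int) : List (Int × Int) :=
  pvAOuter length max_tokens 0

-- ===== PORT B =====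
-- B's single `for j in range(n)` loop; state: segment start i, running max m (none at a fresh start)
def pvBGo (length : List Int) (max_tokens : Int) (j i : Nat) (m : Option Int) : List (Int × Int) :=
  if h : j < length.length then
    let v := PySem.List.pyGetD length (j : Int) 0      -- length[j], in range; default dead code
    let m' := match m with | none => v | some w => max w v
    let nxt := max m' (PySem.List.pyGetD length (min ((j : Int) + 1) ((length.length : Int) - 1)) 0)
    if (m' * ((j : Int) + 1 - (i : Int)) ≤ max_tokens ∧ max_tokens < nxt * ((j : Int) + 2 - (i : Int))) ∨ j = length.length - 1
    then ((i : Int), (j : Int)) :: pvBGo length max_tokens (j + 1) (j + 1) none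
    else pvBGo length max_tokens (j + 1) i (some m')
  else []
termination_by length.length - j

def batch_by_tokens_alt (length : List Int) (max_tokens : Int) : List (Int × Int) :=
  pvBGo length max_tokens 0 0 none

-- ===== PRECONDITION & SPEC =====
def Spec_batch_by_tokens (length : List Int) (max_tokens : Int) (out : List (Int × Int)) : Prop := out = batch_by_tokens_alt length max_tokens
instance (length : List Int) (max_tokens : Int) (out : List (Int × Int)) : Decidable (Spec_batch_by_tokens length max_tokens out) := by unfold Spec_batch_by_tokens; infer_instance

-- ===== CLAIM (what is proved, stated in full; the proofs are below) =====
def Claim_equal_batch_by_tokens : Prop := ∀ (length : List Int) (max_tokens : Int), Dom_batch_by_tokens length max_tokens → Spec_batch_by_tokens length max_tokens (batch_by_tokens length max_tokens)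

-- ===== LEMMAS AND PROOFS =====

-- max of length[i:j] (as A computes it)
def pvSegMax (length : List Int) (i j : Nat) : Int :=
  (PySem.List.max? ((length.drop i).take (j - i)) (fun y => y)).getD 0

theorem pvSegMax_start (length : List Int) (j : Nat) (hj : j < length.length) :
    pvSegMax length j (j + 1) = length.getD j 0 := by
  unfold pvSegMax
  have h1 : j + 1 - j = 1 := by omega
  have h2 : (length.drop j).take 1 = [length[j]] := by
    rw [List.drop_eq_getElem_cons hj]
    rfl
  rw [h1, h2]
  simp [PySem.List.max?_id_cons, List.getD, List.getElem?_eq_getElem hj, List.foldl]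

theorem pvSegMax_step (length : List Int) (i j : Nat) (hij : i < j) (hj : j < length.length) :
    pvSegMax length i (j + 1) = max (pvSegMax length i j) (length.getD j 0) := by
  unfold pvSegMax
  have h1 : j + 1 - i = (j - i) + 1 := by omega
  have h3 : i + (j - i) = j := by omega
  have h2 : (length.drop i)[j - i]? = some length[j] := by
    rw [List.getElem?_drop, h3, List.getElem?_eq_getElem hj]
  rw [h1, List.take_succ, h2]
  obtain ⟨x, t, hxs⟩ : ∃ x t, (length.drop i).take (j - i) = x :: t := by
    cases hcase : (length.drop i).take (j - i) with
    | nil =>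
      exfalso
      have := congrArg List.length hcase
      simp [List.length_take, List.length_drop] at this
      omega
    | cons a b => exact ⟨a, b, rfl⟩
  rw [hxs]
  simp [PySem.List.max?_id_cons, List.foldl_append, List.getD, List.getElem?_eq_getElem hj,
    List.foldl]

theorem pvAInner_maxc (length : List Int) (i j : Nat) :
    PySem.List.slice length (some (i : Int)) (some ((j : Int) + 1)) = (length.drop i).take (j + 1 - i) := by
  have h : ((j : Int) + 1) = ((j + 1 : Nat) : Int) := by push_cast; ring
  rw [h, PySem.List.slice_natCast]

theorem pvAOuter_eq_some (length : List Int) (max_tokens : Int) (i j : Nat)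
    (hI : pvAInner length max_tokens i i = some j) :
    pvAOuter length max_tokens i = ((i : Int), (j : Int)) :: pvAOuter length max_tokens (j + 1) := by
  have hb := pvAInner_bound length max_tokens i i j hI
  rw [pvAOuter, dif_pos (by omega : i < length.length)]
  split <;> simp_all

theorem pvAOuter_eq_none (length : List Int) (max_tokens : Int) (i : Nat)
    (hI : pvAInner length max_tokens i i = none) :
    pvAOuter length max_tokens i = [] := by
  rw [pvAOuter]
  split
  · split <;> simp_all
  · rfl

theorem pvMain (length : List Int) (max_tokens : Int) :
    ∀ (k j i : Nat) (m : Option Int), length.length - j ≤ k → i ≤ j →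
    ((i = j ∧ m = none) ∨ (i < j ∧ m = some (pvSegMax length i j))) →
    pvBGo length max_tokens j i m =
      match pvAInner length max_tokens i j with
      | some j' => ((i : Int), (j' : Int)) :: pvAOuter length max_tokens (j' + 1)
      | none => [] := by
  intro k
  induction k with
  | zero =>
    intro j i m hk hij _
    rw [pvBGo, dif_neg (by omega), pvAInner, dif_neg (by omega)]
  | succ k ih =>
    intro j i m hk hij hinv
    by_cases hjn : j < length.length
    · rw [pvBGo, dif_pos hjn, pvAInner, dif_pos hjn]
      have hmaxc : (PySem.List.max? (PySem.List.slice length (some (i : Int)) (some ((j : Int) + 1))) (fun y => y)).getD 0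
          = pvSegMax length i (j + 1) := by
        rw [pvAInner_maxc]; rfl
      rcases hinv with ⟨hij', rfl⟩ | ⟨hlt, rfl⟩
      · have hv : PySem.List.pyGetD length (j : Int) 0 = pvSegMax length i (j + 1) := by
          rw [hij', pvSegMax_start length j hjn]
          simp [List.getD]
        dsimp only
        rw [hv, hmaxc]
        split_ifs with hc
        · dsimp only
          congr 1
          rw [ih (j + 1) (j + 1) none (by omega) (by omega) (Or.inl ⟨rfl, rfl⟩)]
          cases hI : pvAInner length max_tokens (j + 1) (j + 1) with
          | some j'' => rw [pvAOuter_eq_some length max_tokens (j + 1) j'' hI]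
          | none => rw [pvAOuter_eq_none length max_tokens (j + 1) hI]
        · exact ih (j + 1) i (some (pvSegMax length i (j + 1))) (by omega) (by omega)
            (Or.inr ⟨by omega, rfl⟩)
      · have hv : max (pvSegMax length i j) (PySem.List.pyGetD length (j : Int) 0) = pvSegMax length i (j + 1) := by
          rw [pvSegMax_step length i j hlt hjn]
          simp [List.getD]
        dsimp only
        rw [hv, hmaxc]
        split_ifs with hc
        · dsimp only
          congr 1
          rw [ih (j + 1) (j + 1) none (by omega) (by omega) (Or.inl ⟨rfl, rfl⟩)]
          cases hI : pvAInner length max_tokens (j + 1) (j + 1) with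
          | some j'' => rw [pvAOuter_eq_some length max_tokens (j + 1) j'' hI]
          | none => rw [pvAOuter_eq_none length max_tokens (j + 1) hI]
        · exact ih (j + 1) i (some (pvSegMax length i (j + 1))) (by omega) (by omega)
            (Or.inr ⟨by omega, rfl⟩)
    · rw [pvBGo, dif_neg hjn, pvAInner, dif_neg hjn]

-- ===== VERDICT (by name: the statement is the Claim_ definition above) =====
theorem batch_by_tokens_spec : Claim_equal_batch_by_tokens := by
  intro length max_tokens _
  unfold Spec_batch_by_tokens batch_by_tokens batch_by_tokens_alt
  rw [pvMain length max_tokens length.length 0 0 none (by omega) (by omega) (Or.inl ⟨rfl, rfl⟩)]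
  cases hI : pvAInner length max_tokens 0 0 with
  | some j => rw [pvAOuter_eq_some length max_tokens 0 j hI]
  | none => rw [pvAOuter_eq_none length max_tokens 0 hI]
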